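-- pv_equiv track=rewrite | github.com/Devopsinitiate/eytgamingworld | doc_consolidation/markdown_validator.py | _validate_table_format
-- ===== SOURCE A (Python) =====
-- def _validate_table_format(table_content: str) -> bool:
--     """
--     Validate table formatting.
--
--     Args:
--         table_content: Table content to validate
--
--     Returns:
--         True if table is properly formatted
--     """
--     lines = table_content.strip().split('\n')
--     if len(lines) < 2:
--         return False
--
--     # Check that all rows have the same number of columns
--     column_counts = []
--     for line in lines:
--         if '|' in line:
--             # Count columns (number of | minus 1, accounting for leading/trailing |)
--             columns = len([col for col in line.split('|') if col.strip()])
--             column_counts.append(columns)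
--
--     # All rows should have the same number of columns
--     return len(set(column_counts)) <= 1
-- ===== SOURCE B (Python) =====
-- def _validate_table_format(table_content: str) -> bool:
--     s = table_content.strip()
--     if '\n' not in s:
--         return False
--     # single character-level state machine: no split(), no per-line lists
--     expected = None   # reference column count
--     count = 0         # closed cells with content on the current line
--     seg = False       # current cell has a non-whitespace character
--     pipe = False      # current line contains '|'
--     for ch in s + '\n':
--         if ch == '\n':
--             if seg:
--                 count += 1
--             if pipe:
--                 if expected is None:
--                     expected = count
--                 elif count != expected:
--                     return False
--             count, seg, pipe = 0, False, False
--         elif ch == '|':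
--             if seg:
--                 count += 1
--             seg = False
--             pipe = True
--         elif not ch.isspace():
--             seg = True
--     return True
-- ===== Notes on version B (the rewrite author's own statement) =====
-- stated objective: alternative
-- what changed: Replaces A's pipeline (split into lines, split each line on the pipe character, collect a list of per-line counts, reduce via set cardinality) by a single character-level state machine that scans the stripped text once, tracking whether the current cell has content, the cell count and whether the line has a pipe, and comparing each line's count against a reference at the line boundary; no splitting and no intermediate lists.
import Mathlib
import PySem

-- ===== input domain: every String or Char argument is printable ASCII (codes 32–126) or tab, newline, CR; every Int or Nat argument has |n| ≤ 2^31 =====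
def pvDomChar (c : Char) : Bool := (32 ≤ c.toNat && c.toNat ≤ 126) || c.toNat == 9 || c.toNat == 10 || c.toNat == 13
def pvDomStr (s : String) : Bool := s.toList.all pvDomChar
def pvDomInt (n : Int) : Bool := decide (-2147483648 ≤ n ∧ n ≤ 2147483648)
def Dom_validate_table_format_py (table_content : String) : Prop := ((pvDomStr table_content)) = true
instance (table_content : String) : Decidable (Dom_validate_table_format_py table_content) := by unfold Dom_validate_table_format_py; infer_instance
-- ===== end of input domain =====

-- B replaces A's split-into-lines / split-each-line / counts-list / set pipeline by one character-level
-- state machine over the stripped text; same value everywhere (alternative decomposition, not claimed faster).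

-- ===== PORT A =====
def pvColCount (line : List Char) : Nat :=
  ((PySem.Chars.splitOn line ['|']).filter (fun col => !(PySem.Chars.strip col).isEmpty)).length

def validate_table_format_py (table_content : String) : Bool :=
  let lines := PySem.Chars.splitOn (PySem.Chars.strip table_content.toList) ['\n']
  if lines.length < 2 then false
  else
    let column_counts := lines.foldl
      (fun acc line => if PySem.Chars.isIn ['|'] line then acc ++ [pvColCount line] else acc) []
    decide ((PySem.Set.ofList column_counts).length ≤ 1)

-- ===== PORT B =====
-- the character-level state machine of Source B: state = (expected, count, seg, pipe)
def pvScan : List Char → Option Nat → Nat → Bool → Bool → Bool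
  | [], _, _, _, _ => true
  | ch :: cs, expected, count, seg, pipe =>
    if ch = '\n' then
      let count' := if seg then count + 1 else count
      if pipe then
        match expected with
        | none => pvScan cs (some count') 0 false false
        | some e => if count' ≠ e then false else pvScan cs expected 0 false false
      else pvScan cs expected 0 false false
    else if ch = '|' then
      pvScan cs expected (if seg then count + 1 else count) false true
    else if !PySem.Chars.isspace ch then
      pvScan cs expected count true pipe
    else pvScan cs expected count seg pipe

def validate_table_format_py_alt (table_content : String) : Bool :=
  let t := PySem.Chars.strip table_content.toList
  if !PySem.Chars.isIn ['\n'] t then false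
  else pvScan (t ++ ['\n']) none 0 false false

-- ===== PRECONDITION & SPEC =====
def Spec_validate_table_format_py (table_content : String) (out : Bool) : Prop := out = validate_table_format_py_alt table_content
instance (table_content : String) (out : Bool) : Decidable (Spec_validate_table_format_py table_content out) := by unfold Spec_validate_table_format_py; infer_instance

-- ===== CLAIM (what is proved, stated in full; the proofs are below) =====
def Claim_equal_validate_table_format_py : Prop := ∀ (table_content : String), Dom_validate_table_format_py table_content → Spec_validate_table_format_py table_content (validate_table_format_py table_content)

-- ===== LEMMAS AND PROOFS =====

-- clean recursion computing PySem's split on a single-character separator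
def pvSplit1 (c : Char) : List Char → List (List Char)
  | [] => [[]]
  | x :: xs => if x = c then [] :: pvSplit1 c xs else (pvSplit1 c xs).modifyHead (x :: ·)

theorem pvSplit1_ne_nil (c : Char) (l : List Char) : pvSplit1 c l ≠ [] := by
  cases l with
  | nil => simp [pvSplit1]
  | cons x xs =>
    simp only [pvSplit1]
    split_ifs
    · simp
    · cases h : pvSplit1 c xs with
      | nil => exact absurd h (pvSplit1_ne_nil c xs)
      | cons a t => simp

theorem pvSplitOn_go_single (c : Char) (fuel : Nat) (l cur : List Char) (acc : List (List Char))
    (h : l.length ≤ fuel) :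
    PySem.Chars.splitOn.go [c] fuel l cur acc =
      acc.reverse ++ (pvSplit1 c l).modifyHead (cur.reverse ++ ·) := by
  induction fuel generalizing l cur acc with
  | zero =>
    have : l = [] := by cases l <;> simp_all
    subst this
    simp [PySem.Chars.splitOn.go, pvSplit1]
  | succ fuel ih =>
    cases l with
    | nil => simp [PySem.Chars.splitOn.go, pvSplit1]
    | cons x xs =>
      simp only [PySem.Chars.splitOn.go]
      by_cases hx : x = c
      · have hpre : List.isPrefixOf [c] (x :: xs) = true := by simp [List.isPrefixOf, hx]
        rw [if_pos hpre]
        simp only [List.length_singleton, List.drop_succ_cons, List.drop_zero]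
        simp only [List.length_cons] at h
        rw [ih xs [] (cur.reverse :: acc) (by omega)]
        subst hx
        simp only [pvSplit1, List.reverse_cons, List.append_assoc,
          List.nil_append, List.reverse_nil, List.singleton_append]
        cases hs : pvSplit1 x xs <;> simp
      · have hpre : List.isPrefixOf [c] (x :: xs) = false := by
          simp [List.isPrefixOf]; exact fun hc => absurd hc.symm hx
        rw [if_neg (by simp [hpre])]
        simp only [List.length_cons] at h
        rw [ih xs (x :: cur) acc (by omega)]
        simp only [pvSplit1, if_neg hx]
        cases hs : pvSplit1 c xs with
        | nil => exact absurd hs (pvSplit1_ne_nil c xs)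
        | cons a t => simp

theorem pvSplitOn_single (c : Char) (l : List Char) :
    PySem.Chars.splitOn l [c] = pvSplit1 c l := by
  have h := pvSplitOn_go_single c (l.length + 1) l [] [] (by omega)
  rw [PySem.Chars.splitOn, h]
  cases hs : pvSplit1 c l with
  | nil => exact absurd hs (pvSplit1_ne_nil c l)
  | cons a t => simp

-- the lines rebuilt with a trailing newline each
def pvJoinNL : List (List Char) → List Char
  | [] => []
  | l :: ls => l ++ '\n' :: pvJoinNL ls

theorem pvJoinNL_split (t : List Char) : pvJoinNL (pvSplit1 '\n' t) = t ++ ['\n'] := by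
  induction t with
  | nil => simp [pvSplit1, pvJoinNL]
  | cons x xs ih =>
    simp only [pvSplit1]
    by_cases hx : x = '\n'
    · subst hx; simp [pvJoinNL, ih]
    · rw [if_neg hx]
      cases hs : pvSplit1 '\n' xs with
      | nil => exact absurd hs (pvSplit1_ne_nil _ xs)
      | cons a ts =>
        simp only [List.modifyHead, pvJoinNL]
        rw [hs] at ih
        simp [pvJoinNL] at ih
        simp [ih]

theorem pvSplit1_no_sep (c : Char) (t : List Char) :
    ∀ l ∈ pvSplit1 c t, c ∉ l := by
  induction t with
  | nil => simp [pvSplit1]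
  | cons x xs ih =>
    simp only [pvSplit1]
    by_cases hx : x = c
    · simp only [if_pos hx]
      intro l hl
      rcases List.mem_cons.mp hl with h | h
      · subst h; simp
      · exact ih l h
    · rw [if_neg hx]
      cases hs : pvSplit1 c xs with
      | nil => exact absurd hs (pvSplit1_ne_nil c xs)
      | cons a ts =>
        intro l hl
        rcases List.mem_cons.mp hl with h | h
        · subst h
          have ha : c ∉ a := ih a (by rw [hs]; simp)
          simp [List.mem_cons, ha]
          exact fun hc => absurd hc.symm hx
        · exact ih l (by rw [hs]; simp [h])

theorem pvSplit1_two_le_iff (t : List Char) :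
    2 ≤ (pvSplit1 '\n' t).length ↔ '\n' ∈ t := by
  induction t with
  | nil => simp [pvSplit1]
  | cons x xs ih =>
    simp only [pvSplit1]
    by_cases hx : x = '\n'
    · subst hx
      constructor
      · intro _; simp
      · intro _
        cases hs : pvSplit1 '\n' xs with
        | nil => exact absurd hs (pvSplit1_ne_nil _ xs)
        | cons a ts => simp
    · rw [if_neg hx]
      rw [List.mem_cons]
      simp only [List.length_modifyHead]
      rw [ih]
      constructor
      · intro h; right; exact h
      · rintro (h | h)
        · exact absurd h.symm hx
        · exact h

-- a cell is kept by A iff it contains a non-whitespace character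
def pvHasContent (col : List Char) : Bool := col.any (fun c => !PySem.Chars.isspace c)

theorem pvStrip_nonempty (col : List Char) :
    (!(PySem.Chars.strip col).isEmpty) = pvHasContent col := by
  have key : (PySem.Chars.strip col) = [] ↔ ∀ x ∈ col, PySem.Chars.isspace x := by
    simp only [PySem.Chars.strip, PySem.Chars.rstrip, PySem.Chars.lstrip,
      List.reverse_eq_nil_iff, List.dropWhile_eq_nil_iff, List.mem_reverse]
    constructor
    · intro h x hx
      rcases List.mem_append.mp
        (show x ∈ List.takeWhile PySem.Chars.isspace col ++ List.dropWhile PySem.Chars.isspace col by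
          rw [List.takeWhile_append_dropWhile]; exact hx) with hm | hm
      · exact List.mem_takeWhile_imp hm
      · exact h x hm
    · intro h x hx
      exact h x ((List.dropWhile_sublist _).subset hx)
  rw [Bool.eq_iff_iff]
  simp only [Bool.not_eq_true', List.isEmpty_eq_false_iff, ne_eq, key, pvHasContent,
    List.any_eq_true, Bool.not_eq_true']
  push Not
  constructor
  · rintro ⟨x, hx, hsp⟩; exact ⟨x, hx, by simpa using hsp⟩
  · rintro ⟨x, hx, hsp⟩; exact ⟨x, hx, by simpa using hsp⟩

-- count of content cells seen by the machine along a '\n'-free line, starting with flag seg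
def pvCount : Bool → List Char → Nat
  | seg, [] => if seg then 1 else 0
  | seg, x :: xs =>
    if x = '|' then (if seg then 1 else 0) + pvCount false xs
    else pvCount (seg || !PySem.Chars.isspace x) xs

theorem pvScan_line (line : List Char) (hline : '\n' ∉ line) :
    ∀ (rest : List Char) (expected : Option Nat) (count : Nat) (seg pipe : Bool),
    pvScan (line ++ '\n' :: rest) expected count seg pipe =
      (if (pipe || line.any (· == '|')) then
        match expected with
        | none => pvScan rest (some (count + pvCount seg line)) 0 false false
        | some e => if count + pvCount seg line ≠ e then false else pvScan rest expected 0 false false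
      else pvScan rest expected 0 false false) := by
  induction line with
  | nil =>
    intro rest expected count seg pipe
    simp only [List.nil_append, pvScan, pvCount, List.any_nil, Bool.or_false]
    cases seg <;> cases pipe <;> cases expected <;> simp
  | cons x xs ih =>
    intro rest expected count seg pipe
    have hx : x ≠ '\n' := fun h => hline (by simp [h])
    have hxs : '\n' ∉ xs := fun h => hline (by simp [h])
    simp only [List.cons_append, pvScan, if_neg hx]
    by_cases hp : x = '|'
    · rw [if_pos hp, ih hxs rest expected (if seg then count + 1 else count) false true]
      simp only [pvCount, List.any_cons, hp]
      have : (if seg then count + 1 else count) + pvCount false xs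
           = count + ((if seg then 1 else 0) + pvCount false xs) := by split_ifs <;> omega
      simp [this]
    · rw [if_neg hp]
      by_cases hsp : PySem.Chars.isspace x
      · rw [if_neg (by simp [hsp]), ih hxs rest expected count seg pipe]
        simp only [pvCount, if_neg hp, hsp]
        have hxp : (x == '|') = false := by simp [hp]
        simp [hxp]
      · rw [if_pos (by simp [hsp]), ih hxs rest expected count true pipe]
        simp only [pvCount, if_neg hp, hsp]
        have hxp : (x == '|') = false := by simp [hp]
        simp [hxp]

theorem pvCount_split (line : List Char) :
    ∀ seg : Bool, pvCount seg line =
      (match pvSplit1 '|' line with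
       | [] => 0
       | s₀ :: rest => (if seg || pvHasContent s₀ then 1 else 0)
           + (rest.filter pvHasContent).length) := by
  induction line with
  | nil => intro seg; simp [pvCount, pvSplit1, pvHasContent]
  | cons x xs ih =>
    intro seg
    simp only [pvCount, pvSplit1]
    by_cases hp : x = '|'
    · rw [if_pos hp, if_pos hp, ih false]
      cases hs : pvSplit1 '|' xs with
      | nil => exact absurd hs (pvSplit1_ne_nil _ xs)
      | cons a ts =>
        have h0 : pvHasContent ([] : List Char) = false := rfl
        simp only [Bool.false_or, List.filter_cons, h0, Bool.or_false]
        have hft : List.filter (fun col => pvHasContent col) ts = List.filter pvHasContent ts := rfl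
        by_cases ha : pvHasContent a
        · simp [ha, Nat.add_comm]
        · simp [ha]
    · rw [if_neg hp, if_neg hp, ih (seg || !PySem.Chars.isspace x)]
      cases hs : pvSplit1 '|' xs with
      | nil => exact absurd hs (pvSplit1_ne_nil _ xs)
      | cons a ts =>
        simp only [List.modifyHead]
        have : pvHasContent (x :: a) = (!PySem.Chars.isspace x || pvHasContent a) := by
          simp [pvHasContent]
        rw [this]
        congr 1
        cases seg <;> cases h1 : PySem.Chars.isspace x <;> cases h2 : pvHasContent a <;> simp

theorem pvIsIn_pipe (line : List Char) :
    PySem.Chars.isIn ['|'] line = line.any (· == '|') := by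
  rw [Bool.eq_iff_iff]
  rw [PySem.Chars.isIn_iff_infix, List.singleton_infix_iff, List.any_eq_true]
  simp

theorem pvColCount_eq (line : List Char) :
    pvColCount line = pvCount false line := by
  rw [pvCount_split]
  unfold pvColCount
  rw [pvSplitOn_single]
  cases hs : pvSplit1 '|' line with
  | nil => exact absurd hs (pvSplit1_ne_nil _ line)
  | cons a ts =>
    simp only [List.filter_cons, pvStrip_nonempty, Bool.false_or]
    have hft : List.filter (fun col => pvHasContent col) ts = List.filter pvHasContent ts := rfl
    by_cases ha : pvHasContent a
    · simp [ha, hft, Nat.add_comm]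
    · simp [ha, hft]

-- streaming over whole lines: the reference-comparison loop
def pvSGo : List (List Char) → Option Nat → Bool
  | [], _ => true
  | line :: rest, expected =>
    if PySem.Chars.isIn ['|'] line then
      match expected with
      | none => pvSGo rest (some (pvColCount line))
      | some e => if pvColCount line ≠ e then false else pvSGo rest expected
    else pvSGo rest expected

theorem pvScan_joinNL (lines : List (List Char)) (h : ∀ l ∈ lines, '\n' ∉ l) :
    ∀ expected, pvScan (pvJoinNL lines) expected 0 false false = pvSGo lines expected := by
  induction lines with
  | nil => intro expected; rfl
  | cons line rest ih =>
    intro expected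
    have hl : '\n' ∉ line := h line (by simp)
    have hr : ∀ l ∈ rest, '\n' ∉ l := fun l hm => h l (by simp [hm])
    simp only [pvJoinNL]
    rw [pvScan_line line hl]
    simp only [pvSGo]
    rw [pvIsIn_pipe, pvColCount_eq]
    simp only [Bool.false_or, Nat.zero_add]
    by_cases hp : line.any (· == '|')
    · rw [if_pos hp, if_pos hp]
      cases expected with
      | none => exact ih hr _
      | some e =>
        by_cases he : pvCount false line = e
        · simp [he, ih hr]
        · simp [he]
    · rw [if_neg hp, if_neg hp]
      exact ih hr _

-- the streaming loop with a fixed reference checks every remaining count against it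
theorem pvSGo_some (ls : List (List Char)) (e : Nat) :
    pvSGo ls (some e) =
      ((ls.filter (fun l => PySem.Chars.isIn ['|'] l)).map pvColCount).all (fun c => c == e) := by
  induction ls with
  | nil => rfl
  | cons l ls ih =>
    simp only [pvSGo, List.filter_cons]
    by_cases h : PySem.Chars.isIn ['|'] l
    · simp [h, List.all_cons]
      by_cases hc : pvColCount l = e
      · simp [hc, ih]
      · simp [hc]
    · simp [h, ih]

theorem pvSGo_none (ls : List (List Char)) :
    pvSGo ls none =
      match (ls.filter (fun l => PySem.Chars.isIn ['|'] l)).map pvColCount with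
      | [] => true
      | c :: cs => cs.all (fun x => x == c) := by
  induction ls with
  | nil => rfl
  | cons l ls ih =>
    simp only [pvSGo, List.filter_cons]
    by_cases h : PySem.Chars.isIn ['|'] l
    · simp [h, pvSGo_some]
    · simp [h, ih]

-- set cardinality ≤ 1 ↔ every element equals the head
theorem pvSetLen_le_one (cs : List Nat) :
    decide ((PySem.Set.ofList cs).length ≤ 1) =
      match cs with
      | [] => true
      | c :: rest => rest.all (fun x => x == c) := by
  match cs with
  | [] => rfl
  | c :: rest =>
    induction rest with
    | nil => rfl
    | cons x xs ih =>
      by_cases hx : x = c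
      · simpa [PySem.Set.ofList, PySem.Set.add, hx] using ih
      · simp only [List.all_cons]
        have h2 : 2 ≤ (PySem.Set.ofList (c :: x :: xs)).length := by
          have hc : c ∈ PySem.Set.ofList (c :: x :: xs) := by
            rw [PySem.Set.mem_ofList]; simp
          have hxm : x ∈ PySem.Set.ofList (c :: x :: xs) := by
            rw [PySem.Set.mem_ofList]; simp
          match hs : PySem.Set.ofList (c :: x :: xs) with
          | [] => simp [hs] at hc
          | [y] =>
            rw [hs] at hc hxm; simp at hc hxm
            exact absurd (hxm.trans hc.symm) hx
          | y :: z :: rest => simp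
        have : ¬ ((PySem.Set.ofList (c :: x :: xs)).length ≤ 1) := by omega
        simp [this, hx]

-- ===== VERDICT (by name: the statement is the Claim_ definition above) =====
theorem validate_table_format_py_spec : Claim_equal_validate_table_format_py := by
  intro s _
  unfold Spec_validate_table_format_py validate_table_format_py validate_table_format_py_alt
  simp only []
  set t := PySem.Chars.strip s.toList with ht
  rw [pvSplitOn_single]
  by_cases h : (pvSplit1 '\n' t).length < 2
  · have hnl : '\n' ∉ t := fun hm => absurd ((pvSplit1_two_le_iff t).mpr hm) (by omega)
    have : PySem.Chars.isIn ['\n'] t = false := by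
      rw [← Bool.not_eq_true, PySem.Chars.isIn_iff_infix, List.singleton_infix_iff]
      exact hnl
    simp [h, this]
  · have hnl : '\n' ∈ t := (pvSplit1_two_le_iff t).mp (by omega)
    have hin : PySem.Chars.isIn ['\n'] t = true := by
      rw [PySem.Chars.isIn_iff_infix, List.singleton_infix_iff]; exact hnl
    rw [if_neg h, if_neg (by simp [hin])]
    rw [← pvJoinNL_split t, pvScan_joinNL _ (pvSplit1_no_sep '\n' t)]
    rw [PySem.List.foldl_append_if, List.nil_append, pvSetLen_le_one, pvSGo_none]
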